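-- pv_equiv track=rewrite | github.com/scott-fleischman/synopsis-20260417 | analysis_update_20260418/scripts/common.py | segment_pairs
-- ===== SOURCE A (Python) =====
-- def segment_pairs(pairs, loose_a=3, loose_b=6, tight_a=1, tight_b=2):
--     def seg(maxa, maxb):
--         blocks=[]
--         cur=[]
--         prev=None
--         for p in pairs:
--             if prev is None:
--                 cur=[p]
--             else:
--                 da = p[0]-prev[0]
--                 db = p[1]-prev[1]
--                 if da<=maxa and db<=maxb:
--                     cur.append(p)
--                 else:
--                     blocks.append(cur); cur=[p]
--             prev=p
--         if cur: blocks.append(cur)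
--         return blocks
--     return seg(loose_a, loose_b), seg(tight_a, tight_b)
-- ===== SOURCE B (Python) =====
-- def segment_pairs(pairs, loose_a=3, loose_b=6, tight_a=1, tight_b=2):
--     n = len(pairs)
--
--     def seg(maxa, maxb):
--         if not pairs:
--             return []
--         bnds = [i + 1 for i, (p, q) in enumerate(zip(pairs, pairs[1:]))
--                 if not (q[0] - p[0] <= maxa and q[1] - p[1] <= maxb)]
--         return [pairs[s:e] for s, e in zip([0] + bnds, bnds + [n])]
--
--     return seg(loose_a, loose_b), seg(tight_a, tight_b)
-- ===== Notes on version B (the rewrite author's own statement) =====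
-- stated objective: alternative
-- what changed: Replaces the grow-a-current-block accumulator loop (blocks/cur/prev state) with a two-phase plan: one pass collects boundary indices where a delta threshold is exceeded, then blocks are produced by slicing the list between consecutive cut points.
import Mathlib
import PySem

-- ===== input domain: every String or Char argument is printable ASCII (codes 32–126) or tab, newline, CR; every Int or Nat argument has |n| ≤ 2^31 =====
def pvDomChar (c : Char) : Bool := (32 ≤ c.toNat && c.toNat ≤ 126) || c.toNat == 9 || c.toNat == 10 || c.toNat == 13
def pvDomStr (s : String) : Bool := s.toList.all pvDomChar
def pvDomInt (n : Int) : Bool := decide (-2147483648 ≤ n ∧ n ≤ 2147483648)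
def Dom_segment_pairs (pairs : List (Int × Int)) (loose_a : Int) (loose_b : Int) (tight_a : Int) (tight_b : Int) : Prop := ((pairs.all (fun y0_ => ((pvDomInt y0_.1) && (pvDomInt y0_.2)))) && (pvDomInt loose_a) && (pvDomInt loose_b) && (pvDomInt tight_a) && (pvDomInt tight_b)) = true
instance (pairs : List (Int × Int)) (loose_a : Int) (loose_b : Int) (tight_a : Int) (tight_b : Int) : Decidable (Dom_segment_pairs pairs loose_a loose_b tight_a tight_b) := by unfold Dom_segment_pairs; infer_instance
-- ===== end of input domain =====

-- B replaces A's grow-a-current-block accumulator with a two-phase plan (collect boundary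
-- indices, then slice between cut points); alternative decomposition, same cost.


-- ===== PORT A =====
-- one loop iteration of A's `for p in pairs`: state = (blocks, cur, prev)
def pvStepA (maxa maxb : Int)
    (st : List (List (Int × Int)) × List (Int × Int) × Option (Int × Int))
    (p : Int × Int) :
    List (List (Int × Int)) × List (Int × Int) × Option (Int × Int) :=
  match st with
  | (blocks, cur, prev) =>
    match prev with
    | none => (blocks, [p], some p)
    | some pr =>
      let da := p.1 - pr.1
      let db := p.2 - pr.2
      if da ≤ maxa ∧ db ≤ maxb then (blocks, cur ++ [p], some p)
      else (blocks ++ [cur], [p], some p)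

def pvSegA (maxa maxb : Int) (pairs : List (Int × Int)) : List (List (Int × Int)) :=
  let st := pairs.foldl (pvStepA maxa maxb) ([], [], none)
  if st.2.1.isEmpty then st.1 else st.1 ++ [st.2.1]   -- `if cur: blocks.append(cur)`

def segment_pairs (pairs : List (Int × Int)) (loose_a : Int) (loose_b : Int) (tight_a : Int) (tight_b : Int) : (List (List (Int × Int))) × (List (List (Int × Int))) :=
  (pvSegA loose_a loose_b pairs, pvSegA tight_a tight_b pairs)

-- ===== PORT B =====
-- `q[0]-p[0] <= maxa and q[1]-p[1] <= maxb` for an adjacent pair (p, q)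
def pvOk (maxa maxb : Int) (p q : Int × Int) : Bool :=
  decide (q.1 - p.1 ≤ maxa) && decide (q.2 - p.2 ≤ maxb)

-- `[i + 1 for i, (p, q) in enumerate(zip(pairs, pairs[1:])) if not ok]`
def pvBnds (maxa maxb : Int) (pairs : List (Int × Int)) : List Int :=
  (PySem.List.enumerate (pairs.zip pairs.tail) 0).filterMap
    (fun ipq => if pvOk maxa maxb ipq.2.1 ipq.2.2 then none else some (ipq.1 + 1))

-- `[pairs[s:e] for s, e in zip([0] + bnds, bnds + [n])]` (or [] for empty pairs)
def pvSegAlt (maxa maxb : Int) (pairs : List (Int × Int)) : List (List (Int × Int)) :=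
  if pairs.isEmpty then []
  else
    let bs := pvBnds maxa maxb pairs
    ((0 :: bs).zip (bs ++ [(pairs.length : Int)])).map
      (fun se => PySem.List.slice pairs (some se.1) (some se.2))

def segment_pairs_alt (pairs : List (Int × Int)) (loose_a : Int) (loose_b : Int) (tight_a : Int) (tight_b : Int) : (List (List (Int × Int))) × (List (List (Int × Int))) :=
  (pvSegAlt loose_a loose_b pairs, pvSegAlt tight_a tight_b pairs)

-- ===== PRECONDITION & SPEC =====
def Spec_segment_pairs (pairs : List (Int × Int)) (loose_a : Int) (loose_b : Int) (tight_a : Int) (tight_b : Int) (out : (List (List (Int × Int))) × (List (List (Int × Int)))) : Prop := out = segment_pairs_alt pairs loose_a loose_b tight_a tight_b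
instance (pairs : List (Int × Int)) (loose_a : Int) (loose_b : Int) (tight_a : Int) (tight_b : Int) (out : (List (List (Int × Int))) × (List (List (Int × Int)))) : Decidable (Spec_segment_pairs pairs loose_a loose_b tight_a tight_b out) := by unfold Spec_segment_pairs; infer_instance

-- ===== CLAIM (what is proved, stated in full; the proofs are below) =====
def Claim_equal_segment_pairs : Prop := ∀ (pairs : List (Int × Int)) (loose_a : Int) (loose_b : Int) (tight_a : Int) (tight_b : Int), Dom_segment_pairs pairs loose_a loose_b tight_a tight_b → Spec_segment_pairs pairs loose_a loose_b tight_a tight_b (segment_pairs pairs loose_a loose_b tight_a tight_b)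

-- ===== LEMMAS AND PROOFS =====

-- finalisation of A's loop state (`if cur: blocks.append(cur)`)
def pvFin (st : List (List (Int × Int)) × List (Int × Int) × Option (Int × Int)) :
    List (List (Int × Int)) :=
  if st.2.1.isEmpty then st.1 else st.1 ++ [st.2.1]

-- prepend a chunk to the first block
def pvPrep (c : List (Int × Int)) : List (List (Int × Int)) → List (List (Int × Int))
  | [] => [c]
  | b :: bs => (c ++ b) :: bs

lemma pvPrep_prep (c p : List (Int × Int)) (L : List (List (Int × Int))) :
    pvPrep c (pvPrep p L) = pvPrep (c ++ p) L := by
  cases L <;> simp [pvPrep]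

lemma pvStepA_some (maxa maxb : Int) (bs : List (List (Int × Int)))
    (cur : List (Int × Int)) (pr q : Int × Int) :
    pvStepA maxa maxb (bs, cur, some pr) q
    = if pvOk maxa maxb pr q then (bs, cur ++ [q], some q)
      else (bs ++ [cur], [q], some q) := by
  simp only [pvStepA, pvOk]
  by_cases h : q.1 - pr.1 ≤ maxa ∧ q.2 - pr.2 ≤ maxb
  · simp [h]
  · rw [if_neg h]
    have : ¬((decide (q.1 - pr.1 ≤ maxa) && decide (q.2 - pr.2 ≤ maxb)) = true) := by
      simpa using h
    rw [if_neg this]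

lemma pvBnds_shift (maxa maxb : Int) (l : List ((Int × Int) × (Int × Int))) (s : Int) :
    (PySem.List.enumerate l (s + 1)).filterMap
      (fun ipq => if pvOk maxa maxb ipq.2.1 ipq.2.2 then none else some (ipq.1 + 1))
    = ((PySem.List.enumerate l s).filterMap
      (fun ipq => if pvOk maxa maxb ipq.2.1 ipq.2.2 then none else some (ipq.1 + 1))).map (· + 1) := by
  induction l generalizing s with
  | nil => simp [PySem.List.enumerate_nil]
  | cons x xs ih =>
    simp only [PySem.List.enumerate_cons, List.filterMap_cons]
    by_cases h : pvOk maxa maxb x.1 x.2 <;> simp [h, ih (s + 1)]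

lemma pvBnds_nonneg (maxa maxb : Int) (l : List ((Int × Int) × (Int × Int))) (s : Int)
    (hs : 0 ≤ s) :
    ∀ x ∈ (PySem.List.enumerate l s).filterMap
      (fun ipq => if pvOk maxa maxb ipq.2.1 ipq.2.2 then none else some (ipq.1 + 1)), 0 ≤ x := by
  induction l generalizing s with
  | nil => simp [PySem.List.enumerate_nil]
  | cons x xs ih =>
    simp only [PySem.List.enumerate_cons, List.filterMap_cons]
    by_cases h : pvOk maxa maxb x.1 x.2
    · simp only [if_pos h]
      exact ih (s + 1) (by omega)
    · simp only [if_neg h]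
      intro y hy
      rcases List.mem_cons.mp hy with rfl | hy
      · omega
      · exact ih (s + 1) (by omega) y hy

lemma pvBnds_cons (maxa maxb : Int) (p q : Int × Int) (r : List (Int × Int)) :
    pvBnds maxa maxb (p :: q :: r)
    = (if pvOk maxa maxb p q then [] else [1]) ++ (pvBnds maxa maxb (q :: r)).map (· + 1) := by
  unfold pvBnds
  simp only [List.tail_cons, List.zip_cons_cons, PySem.List.enumerate_cons, List.filterMap_cons]
  have h := pvBnds_shift maxa maxb ((q :: r).zip r) 0
  norm_num at h
  by_cases hok : pvOk maxa maxb p q <;> simp [hok, h]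

lemma pvSlice_shift (p : Int × Int) (xs : List (Int × Int)) (s e : Int) (hs : 0 ≤ s)
    (he : 0 ≤ e) :
    PySem.List.slice (p :: xs) (some (s + 1)) (some (e + 1))
    = PySem.List.slice xs (some s) (some e) := by
  rw [PySem.List.slice_toNat _ (by omega) (by omega), PySem.List.slice_toNat _ hs he]
  have h1 : (s + 1).toNat = s.toNat + 1 := by omega
  have h2 : (e + 1).toNat = e.toNat + 1 := by omega
  simp [h1, h2]

lemma pvSlice_head (p : Int × Int) (xs : List (Int × Int)) (e : Int) (he : 0 ≤ e) :
    PySem.List.slice (p :: xs) (some 0) (some (e + 1))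
    = p :: PySem.List.slice xs (some 0) (some e) := by
  rw [PySem.List.slice_toNat _ le_rfl (by omega), PySem.List.slice_toNat _ le_rfl he]
  have h2 : (e + 1).toNat = e.toNat + 1 := by omega
  simp [h2, List.take_succ_cons]

lemma pvZip_shift (p : Int × Int) (xs : List (Int × Int)) :
    ∀ (B1 B2 : List Int), (∀ b ∈ B1, 0 ≤ b) → (∀ b ∈ B2, 0 ≤ b) →
    ((B1.map (· + 1)).zip (B2.map (· + 1))).map
      (fun se => PySem.List.slice (p :: xs) (some se.1) (some se.2))
    = (B1.zip B2).map (fun se => PySem.List.slice xs (some se.1) (some se.2)) := by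
  intro B1
  induction B1 with
  | nil => intro B2 _ _; simp
  | cons b B1' ih =>
    intro B2 h1 h2
    cases B2 with
    | nil => simp
    | cons c B2' =>
      simp only [List.map_cons, List.zip_cons_cons, List.map_cons]
      rw [pvSlice_shift p xs b c (h1 b (by simp)) (h2 c (by simp)),
        ih B2' (fun x hx => h1 x (by simp [hx])) (fun x hx => h2 x (by simp [hx]))]

-- cons-characterisation of B's segmentation
lemma pvSegAlt_single (maxa maxb : Int) (p : Int × Int) :
    pvSegAlt maxa maxb [p] = [[p]] := by
  unfold pvSegAlt pvBnds
  simp [PySem.List.enumerate_nil, PySem.List.slice_toNat]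

lemma pvSegAlt_ne_nil (maxa maxb : Int) (x : Int × Int) (l : List (Int × Int)) :
    pvSegAlt maxa maxb (x :: l) ≠ [] := by
  simp only [pvSegAlt, List.isEmpty_cons, Bool.false_eq_true, if_false]
  cases h : pvBnds maxa maxb (x :: l) <;> simp

lemma pvSegAlt_cons (maxa maxb : Int) (p q : Int × Int) (r : List (Int × Int)) :
    pvSegAlt maxa maxb (p :: q :: r)
    = if pvOk maxa maxb p q then pvPrep [p] (pvSegAlt maxa maxb (q :: r))
      else [p] :: pvSegAlt maxa maxb (q :: r) := by
  have hnn : ∀ b ∈ pvBnds maxa maxb (q :: r), 0 ≤ b :=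
    pvBnds_nonneg maxa maxb _ 0 le_rfl
  have hlen : ((p :: q :: r).length : Int) = ((q :: r).length : Int) + 1 := by
    simp
  simp only [pvSegAlt, List.isEmpty_cons, Bool.false_eq_true, if_false, pvBnds_cons]
  cases hok : pvOk maxa maxb p q
  · -- break between p and q: first block is [p], the rest shift by one
    simp only [Bool.false_eq_true, if_false, List.cons_append, List.nil_append,
      List.zip_cons_cons, List.map_cons]
    have h01 : PySem.List.slice (p :: q :: r) (some 0) (some 1) = [p] := by
      rw [PySem.List.slice_toNat _ le_rfl (by omega)]
      simp
    rw [h01]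
    have hsh := pvZip_shift p (q :: r) (0 :: pvBnds maxa maxb (q :: r))
      (pvBnds maxa maxb (q :: r) ++ [((q :: r).length : Int)])
      (by intro x hx
          rcases List.mem_cons.mp hx with rfl | hx
          · exact le_rfl
          · exact hnn x hx)
      (by intro x hx
          rcases List.mem_append.mp hx with hx | hx
          · exact hnn x hx
          · simp at hx; omega)
    simp only [List.map_cons, List.map_append, List.map_nil, List.length_cons] at hsh ⊢
    push_cast at hsh ⊢
    rw [hsh]
  · -- no break: p joins the first block of the tail's segmentation
    simp only [if_true, List.nil_append]
    cases hB : pvBnds maxa maxb (q :: r) with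
    | nil =>
      simp only [List.map_nil, List.nil_append, List.zip_cons_cons, List.zip_nil_right,
        List.map_cons, List.map_nil, hlen]
      rw [pvSlice_head p (q :: r) _ (by positivity)]
      simp [pvPrep]
    | cons b B' =>
      have h0 : 0 ≤ b := hnn b (by simp [hB])
      simp only [List.map_cons, List.zip_cons_cons, List.cons_append, List.map_cons,
        List.length_cons]
      push_cast
      rw [pvSlice_head p (q :: r) b h0]
      have hsh := pvZip_shift p (q :: r) (b :: B') (B' ++ [((q :: r).length : Int)])
        (by intro x hx
            rcases List.mem_cons.mp hx with rfl | hx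
            · exact h0
            · exact hnn x (by simp [hB, hx]))
        (by intro x hx
            rcases List.mem_append.mp hx with hx | hx
            · exact hnn x (by simp [hB, hx])
            · simp at hx; omega)
      simp only [List.map_cons, List.map_append, List.map_nil, List.length_cons] at hsh
      push_cast at hsh
      rw [hsh]
      simp [pvPrep]

-- A's loop, characterised against B's segmentation
lemma pvLoopA (maxa maxb : Int) :
    ∀ (l : List (Int × Int)) (p : Int × Int) (c : List (Int × Int))
      (bs : List (List (Int × Int))),
    pvFin (l.foldl (pvStepA maxa maxb) (bs, c ++ [p], some p))
    = bs ++ pvPrep c (pvSegAlt maxa maxb (p :: l)) := by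
  intro l
  induction l with
  | nil =>
    intro p c bs
    simp [pvFin, pvSegAlt_single, pvPrep]
  | cons q l ih =>
    intro p c bs
    simp only [List.foldl_cons, pvStepA_some]
    rw [pvSegAlt_cons]
    cases hok : pvOk maxa maxb p q
    · simp only [Bool.false_eq_true, if_false]
      have h := ih q [] (bs ++ [c ++ [p]])
      simp only [List.nil_append] at h
      rw [h]
      cases hS : pvSegAlt maxa maxb (q :: l) with
      | nil => exact absurd hS (pvSegAlt_ne_nil maxa maxb q l)
      | cons b B => simp [pvPrep]
    · simp only [if_true]
      have h := ih q (c ++ [p]) bs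
      rw [h, pvPrep_prep]

lemma pvSeg_eq (maxa maxb : Int) (pairs : List (Int × Int)) :
    pvSegA maxa maxb pairs = pvSegAlt maxa maxb pairs := by
  cases pairs with
  | nil => simp [pvSegA, pvSegAlt]
  | cons p l =>
    have h0 : pvSegA maxa maxb (p :: l)
        = pvFin ((p :: l).foldl (pvStepA maxa maxb) ([], [], none)) := rfl
    have h1 : pvStepA maxa maxb ([], [], none) p
        = (([] : List (List (Int × Int))), [] ++ [p], some p) := by
      simp [pvStepA]
    rw [h0, List.foldl_cons, h1, pvLoopA]
    cases hS : pvSegAlt maxa maxb (p :: l) with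
    | nil => exact absurd hS (pvSegAlt_ne_nil maxa maxb p l)
    | cons b B => simp [pvPrep]

-- ===== VERDICT (by name: the statement is the Claim_ definition above) =====
theorem segment_pairs_spec : Claim_equal_segment_pairs := by
  intro pairs la lb ta tb _
  unfold Spec_segment_pairs segment_pairs segment_pairs_alt
  rw [pvSeg_eq, pvSeg_eq]
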